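-- pv_equiv track=rewrite | github.com/sshrik/algo-study | BaekJoon/success/1000 ~ 2000/bk1541.py | getAllPlus
-- ===== SOURCE A (Python) =====
-- def getAllPlus(num, oper, start):
--     i = start
--     res = num[i]
--
--     while i != len(oper):
--         if oper[i] == '+':
--             res += num[i + 1]
--             i += 1
--         else:
--             return res, i
--     return res, i
-- ===== SOURCE B (Python) =====
-- def getAllPlus(num, oper, start):
--     # Two-phase: first find the stopping index j, then reduce the run.
--     j = start
--     while j != len(oper) and oper[j] == '+':
--         j += 1
--     res = num[start]
--     for k in range(start + 1, j + 1):
--         res += num[k]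
--     return res, j
-- ===== Notes on version B (the rewrite author's own statement) =====
-- stated objective: simpler
-- what changed: Replaces A's single accumulate-while-scanning loop carrying (i, res) with two separate phases: a boundary scan that finds the first non-'+' position j, then a plain reduction over num[start..j].
import Mathlib
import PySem

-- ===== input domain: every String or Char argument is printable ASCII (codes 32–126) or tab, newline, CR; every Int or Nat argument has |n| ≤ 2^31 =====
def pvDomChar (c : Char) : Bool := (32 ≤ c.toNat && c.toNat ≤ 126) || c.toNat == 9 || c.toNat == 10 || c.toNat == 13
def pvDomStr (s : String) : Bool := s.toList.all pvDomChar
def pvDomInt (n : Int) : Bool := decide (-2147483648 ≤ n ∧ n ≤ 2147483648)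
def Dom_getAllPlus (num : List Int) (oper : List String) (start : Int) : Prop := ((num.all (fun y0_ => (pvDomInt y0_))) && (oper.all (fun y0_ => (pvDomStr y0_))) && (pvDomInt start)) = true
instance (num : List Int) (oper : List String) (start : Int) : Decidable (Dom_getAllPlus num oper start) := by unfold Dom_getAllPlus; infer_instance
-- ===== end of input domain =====

-- B finds the stopping index first and then reduces the run in a second pass,
-- instead of A's single loop that accumulates while scanning (objective: simpler decomposition).

-- ===== PORT A =====
-- A's while loop over state (i, res); fuel bounds the number of iterations (the
-- loop advances i by 1 each step and stops at i = len(oper), so the fuel suffices).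
def pvLoopA (num : List Int) (oper : List String) (fuel : Nat) (i : Int) (res : Int) : Int × Int :=
  match fuel with
  | 0 => (res, i)
  | fuel + 1 =>
    if i = (oper.length : Int) then (res, i)
    else if PySem.List.pyGet? oper i = some "+" then
      pvLoopA num oper fuel (i + 1) (res + (PySem.List.pyGet? num (i + 1)).getD 0)
    else (res, i)

def getAllPlus (num : List Int) (oper : List String) (start : Int) : Int × Int :=
  pvLoopA num oper (((oper.length : Int) - start).toNat + 1) start ((PySem.List.pyGet? num start).getD 0)

-- ===== PORT B =====
-- Source B phase 1: while j != len(oper) and oper[j] == '+': j += 1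
def pvFindStop (oper : List String) (fuel : Nat) (j : Int) : Int :=
  match fuel with
  | 0 => j
  | fuel + 1 =>
    if j = (oper.length : Int) then j
    else if PySem.List.pyGet? oper j = some "+" then pvFindStop oper fuel (j + 1)
    else j

def getAllPlus_alt (num : List Int) (oper : List String) (start : Int) : Int × Int :=
  let j := pvFindStop oper (((oper.length : Int) - start).toNat + 1) start
  -- phase 2: res = num[start]; for k in range(start+1, j+1): res += num[k]
  let res := (PySem.List.pyRange (start + 1) (j + 1) 1).foldl
      (fun r k => r + (PySem.List.pyGet? num k).getD 0) ((PySem.List.pyGet? num start).getD 0)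
  (res, j)

-- ===== PRECONDITION & SPEC =====
-- Pre_ is exactly the set of inputs on which Python A returns (no IndexError):
-- num[start] in range (negative indices wrap), start within oper's index range or equal
-- to len(oper), and num[j+1] in range for every position j of the contiguous '+'-run at start.
def Pre_getAllPlus (num : List Int) (oper : List String) (start : Int) : Prop :=
  (PySem.List.pyGet? num start).isSome ∧
  start ≤ (oper.length : Int) ∧ -(oper.length : Int) ≤ start ∧
  ∀ j ∈ PySem.List.pyRange start (oper.length : Int) 1,
    (∀ k ∈ PySem.List.pyRange start (j + 1) 1, PySem.List.pyGet? oper k = some "+") →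
    (PySem.List.pyGet? num (j + 1)).isSome
instance (num : List Int) (oper : List String) (start : Int) : Decidable (Pre_getAllPlus num oper start) := by unfold Pre_getAllPlus; infer_instance

def pvWitness_getAllPlus : List Int × List String × Int := ([1, 2, 3], ["+", "-"], 0)

def Spec_getAllPlus (num : List Int) (oper : List String) (start : Int) (out : Int × Int) : Prop := out = getAllPlus_alt num oper start
instance (num : List Int) (oper : List String) (start : Int) (out : Int × Int) : Decidable (Spec_getAllPlus num oper start out) := by unfold Spec_getAllPlus; infer_instance

-- ===== CLAIM (what is proved, stated in full; the proofs are below) =====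
def Claim_equal_getAllPlus : Prop := ∀ (num : List Int) (oper : List String) (start : Int), Dom_getAllPlus num oper start → Pre_getAllPlus num oper start → Spec_getAllPlus num oper start (getAllPlus num oper start)

-- ===== LEMMAS AND PROOFS =====

lemma pvFindStop_ge (oper : List String) (fuel : Nat) (j : Int) : j ≤ pvFindStop oper fuel j := by
  induction fuel generalizing j with
  | zero => simp [pvFindStop]
  | succ fuel ih =>
    simp only [pvFindStop]
    split_ifs with h1 h2
    · exact le_refl j
    · exact le_trans (by omega) (ih (j + 1))
    · exact le_refl j

lemma pvLoopA_eq (num : List Int) (oper : List String) (fuel : Nat) :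
    ∀ (i res : Int),
      pvLoopA num oper fuel i res =
        ((PySem.List.pyRange (i + 1) (pvFindStop oper fuel i + 1) 1).foldl
            (fun r k => r + (PySem.List.pyGet? num k).getD 0) res,
          pvFindStop oper fuel i) := by
  induction fuel with
  | zero =>
    intro i res
    simp [pvLoopA, pvFindStop, PySem.List.pyRange_one_eq_nil (le_refl (i + 1))]
  | succ fuel ih =>
    intro i res
    simp only [pvLoopA, pvFindStop]
    split_ifs with h1 h2
    · simp [PySem.List.pyRange_one_eq_nil (le_refl (i + 1))]
    · rw [ih (i + 1) (res + (PySem.List.pyGet? num (i + 1)).getD 0)]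
      have hge : i + 1 ≤ pvFindStop oper fuel (i + 1) := pvFindStop_ge oper fuel (i + 1)
      rw [PySem.List.pyRange_one_cons (by omega : i + 1 < pvFindStop oper fuel (i + 1) + 1)]
      simp [List.foldl_cons]
    · simp [PySem.List.pyRange_one_eq_nil (le_refl (i + 1))]

-- ===== VERDICT (by name: the statement is the Claim_ definition above) =====
theorem getAllPlus_spec : Claim_equal_getAllPlus := by
  intro num oper start _ _
  unfold Spec_getAllPlus getAllPlus getAllPlus_alt
  rw [pvLoopA_eq]
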